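-- pv_equiv track=rewrite | github.com/MauricioDuarte100/cryptoCTF | solver/solve_auth2.py | gf_pow
-- ===== SOURCE A (Python) =====
-- def bytes_to_int(b: bytes) -> int:
--     return int.from_bytes(b, 'big')
--
-- def int_to_bytes(n: int, length: int = 16) -> bytes:
--     return n.to_bytes(length, 'big')
--
-- def bytes_to_bits(X: bytes):
--     res = []
--     for b in X:
--         for bb in bin(b)[2:].zfill(8):
--             res.append(int(bb))
--     return res
--
-- def bits_to_bytes(X):
--     X = [str(x) for x in X]
--     res = []
--     for b in range(0, len(X), 8):
--         res.append(int("".join(X[b:b+8]), 2))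
--     return bytes(res)
--
-- def gcm_mul_challenge(X: bytes, Y: bytes) -> bytes:
--     """EXACT copy of the challenge's mul() function."""
--     BLOCK_LEN = 16
--     R = bytes_to_bits(b"\xe1" + b"\x00"*(BLOCK_LEN-1))
--     X_bits = bytes_to_bits(X)
--     V = bytes_to_bits(Y)
--     Z = [0x00 for _ in range(BLOCK_LEN*8)]
--
--     for i in range(BLOCK_LEN*8):
--         if X_bits[i] != 0:
--             Z = [z^v for z,v in zip(Z,V)]
--         if V[-1] != 0:
--             V = [0] + V[:-1]
--             V = [v^r for v,r in zip(V, R)]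
--         else:
--             V = [0] + V[:-1]
--
--     return bits_to_bytes(Z)
--
-- def gf_mul_int(a: int, b: int) -> int:
--     """Multiply two 128-bit integers in GF(2^128) matching challenge representation."""
--     # Convert to bytes, multiply, convert back
--     a_bytes = int_to_bytes(a, 16)
--     b_bytes = int_to_bytes(b, 16)
--     result_bytes = gcm_mul_challenge(a_bytes, b_bytes)
--     return bytes_to_int(result_bytes)
--
-- def gf_pow(base: int, exp: int) -> int:
--     """Compute base^exp in GF(2^128)."""
--     result = 1
--     while exp > 0:
--         if exp & 1:
--             result = gf_mul_int(result, base)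
--         base = gf_mul_int(base, base)
--         exp >>= 1
--     return result
-- ===== SOURCE B (Python) =====
-- M128 = (1 << 128) - 1
--
-- def _rev128(x: int) -> int:
--     # reflect the low 128 bits (GCM's bit order <-> plain polynomial order)
--     r = 0
--     for _ in range(128):
--         r = (r << 1) | (x & 1)
--         x >>= 1
--     return r
--
-- def _clmul(a: int, b: int) -> int:
--     # carryless (XOR) product, recursively: a*b = 2*(a*(b//2)) xor (a if b odd)
--     if b <= 0:
--         return 0
--     return (_clmul(a, b >> 1) << 1) ^ (a if b & 1 else 0)
--
-- def _gf_mul(a: int, b: int) -> int: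
--     # full 256-bit carryless product, then lazy reduction: fold the high half
--     # twice with x^128 = x^7 + x^2 + x + 1 (constant 0x87)
--     c = _clmul(a, b)
--     c = (c & M128) ^ _clmul(c >> 128, 0x87)
--     c = (c & M128) ^ _clmul(c >> 128, 0x87)
--     return c
--
-- def gf_pow(base: int, exp: int) -> int:
--     """Compute base^exp in GF(2^128)."""
--     if exp <= 0:
--         return 1
--     b = _rev128(base)
--     r = _rev128(1)
--     while exp > 0:
--         if exp & 1:
--             r = _gf_mul(b, r)
--         b = _gf_mul(b, b)
--         exp >>= 1
--     return _rev128(r)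
-- ===== Notes on version B (the rewrite author's own statement) =====
-- stated objective: faster
-- what changed: A multiplies via a 128-step shift-register over 128-entry Python bit lists with modular reduction interleaved at every step (bytes -> bit lists -> per-bit zip-XORs -> bytes -> int); B instead computes the full 256-bit carryless product by a recursive Horner scheme on bit-reflected integers and only then reduces lazily, folding the high 128 bits twice with the constant 0x87 (x^128 = x^7+x^2+x+1); the square-and-multiply outer loop is kept.
-- outside the precondition, e.g. on gf_pow(-1, 1): A raises OverflowError, B returns 303022444664092540401039765773284802560
import Mathlib
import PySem

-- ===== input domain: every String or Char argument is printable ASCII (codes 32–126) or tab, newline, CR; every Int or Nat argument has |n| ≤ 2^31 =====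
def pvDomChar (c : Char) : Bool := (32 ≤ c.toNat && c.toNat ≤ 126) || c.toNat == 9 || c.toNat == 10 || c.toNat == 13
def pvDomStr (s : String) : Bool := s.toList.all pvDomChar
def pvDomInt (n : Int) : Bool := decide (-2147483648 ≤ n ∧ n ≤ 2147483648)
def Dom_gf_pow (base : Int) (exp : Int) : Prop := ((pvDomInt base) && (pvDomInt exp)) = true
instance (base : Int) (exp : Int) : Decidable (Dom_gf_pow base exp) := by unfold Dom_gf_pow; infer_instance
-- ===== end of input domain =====

-- B replaces A's per-bit shift-register multiplier (interleaved modular reduction over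
-- 128-entry bit lists) by a full 256-bit carryless product computed by a recursive Horner
-- scheme on bit-reflected integers, followed by a lazy two-fold reduction with 0x87
-- (measurably faster by a large constant factor).

-- ===== PORT A =====

-- bin(b)[2:] for b ≥ 0, as the list of binary digits, LSB first then reversed (hand port of
-- Python's bin, via structural fuel: exact for b < 2^16; callers pass bytes b < 256): bin(0)[2:] = "0"
def binRev : Nat → Nat → List Int
  | 0, _ => []
  | f+1, n => if n = 0 then [] else ((n % 2 : Nat) : Int) :: binRev f (n / 2)
def pyBin (b : Nat) : List Int := if b = 0 then [0] else (binRev 16 b).reverse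

-- .zfill(8) on the digit string
def zfill8 (l : List Int) : List Int := List.replicate (8 - l.length) 0 ++ l

-- int.from_bytes(b, 'big'): big-endian base-256 value (hand port, exact for byte lists)
def bytes_to_int (b : List Int) : Int := b.foldl (fun a x => 256 * a + x) 0

-- n.to_bytes(length, 'big') (hand port, exact for 0 ≤ n < 2^(8*length), which Pre_ guarantees here)
def int_to_bytes (n : Int) (length : Nat) : List Int :=
  (List.range length).map (fun i => (((n.toNat >>> (8 * (length - 1 - i))) % 256 : Nat) : Int))

-- bytes_to_bits: for each byte append its 8 digits int(bb) (bytes are 0..255, so b.toNat is exact)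
def bytes_to_bits (X : List Int) : List Int :=
  X.foldl (fun res b => res ++ zfill8 (pyBin b.toNat)) []

-- bits_to_bytes: int("".join(X[b:b+8]), 2) is the base-2 value of the 8 digits (exact: entries are 0/1 digits)
def bits_to_bytes (X : List Int) : List Int :=
  (PySem.List.pyRange 0 (X.length : Int) 8).foldl
    (fun res b => res ++ [(PySem.List.slice X (some b) (some (b + 8))).foldl (fun a d => 2 * a + d) 0]) []

-- EXACT copy of the challenge's mul() function
def gcm_mul_challenge (X : List Int) (Y : List Int) : List Int :=
  let R := bytes_to_bits ((0xe1 : Int) :: List.replicate 15 0)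
  let X_bits := bytes_to_bits X
  let V0 := bytes_to_bits Y
  let Z0 : List Int := (PySem.List.pyRange 0 128 1).map (fun _ => 0)
  -- the loop body computes Z from the old (Z, V) and V from the old V, in order
  let ZV := (PySem.List.pyRange 0 128 1).foldl
    (fun (ZV : List Int × List Int) i =>
      (if PySem.List.pyGetD X_bits i 0 ≠ 0
       then List.zipWith (fun z v => PySem.Int.bxor z v) ZV.1 ZV.2 else ZV.1,
       if PySem.List.pyGetD ZV.2 (-1) 0 ≠ 0
       then List.zipWith (fun v r => PySem.Int.bxor v r)
              (0 :: PySem.List.slice ZV.2 none (some (-1))) R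
       else 0 :: PySem.List.slice ZV.2 none (some (-1)))) (Z0, V0)
  bits_to_bytes ZV.1

def gf_mul_int (a : Int) (b : Int) : Int :=
  bytes_to_int (gcm_mul_challenge (int_to_bytes a 16) (int_to_bytes b 16))

-- while exp > 0: …  (Python's exp >> 1 is Lean's exp >>> (1:Nat); exp & 1 is PySem.Int.band)
def gfPowLoopA (result : Int) (base : Int) (exp : Int) : Int :=
  if h : 0 < exp then
    gfPowLoopA (if PySem.Int.band exp 1 ≠ 0 then gf_mul_int result base else result)
      (gf_mul_int base base) (exp >>> (1:Nat))
  else result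
termination_by exp.toNat
decreasing_by
  have : exp >>> (1:Nat) = exp / 2 ^ 1 := Int.shiftRight_eq_div_pow exp 1
  omega

def gf_pow (base : Int) (exp : Int) : Int := gfPowLoopA 1 base exp

-- ===== PORT B =====

-- _rev128: reflect the low 128 bits
def rev128 (x : Int) : Int :=
  ((PySem.List.pyRange 0 128 1).foldl
    (fun (p : Int × Int) _ => (PySem.Int.bor (p.1 <<< (1:Nat)) (PySem.Int.band p.2 1), p.2 >>> (1:Nat)))
    (0, x)).1

-- _clmul: carryless product, recursively (Horner on the low bit of b)
def clmulB (a : Int) (b : Int) : Int :=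
  if h : b ≤ 0 then 0
  else PySem.Int.bxor ((clmulB a (b >>> (1:Nat))) <<< (1:Nat))
         (if PySem.Int.band b 1 ≠ 0 then a else 0)
termination_by b.toNat
decreasing_by
  have : b >>> (1:Nat) = b / 2 ^ 1 := Int.shiftRight_eq_div_pow b 1
  omega

-- M128 = (1 << 128) - 1
def pvM128 : Int := (1 <<< (128:Nat)) - 1

-- _gf_mul: full product, then two reduction folds of the high half with 0x87
def gfMulB (a : Int) (b : Int) : Int :=
  let c := clmulB a b
  let c1 := PySem.Int.bxor (PySem.Int.band c pvM128) (clmulB (c >>> (128:Nat)) 0x87)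
  PySem.Int.bxor (PySem.Int.band c1 pvM128) (clmulB (c1 >>> (128:Nat)) 0x87)

def gfPowLoopB (r : Int) (b : Int) (exp : Int) : Int :=
  if h : 0 < exp then
    gfPowLoopB (if PySem.Int.band exp 1 ≠ 0 then gfMulB b r else r) (gfMulB b b) (exp >>> (1:Nat))
  else r
termination_by exp.toNat
decreasing_by
  have : exp >>> (1:Nat) = exp / 2 ^ 1 := Int.shiftRight_eq_div_pow exp 1
  omega

def gf_pow_alt (base : Int) (exp : Int) : Int :=
  if exp ≤ 0 then 1
  else rev128 (gfPowLoopB (rev128 1) (rev128 base) exp)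

-- ===== PRECONDITION & SPEC =====
-- Pre_ excludes exactly the inputs where A raises: for 0 < exp, a negative base makes
-- int_to_bytes (Python's int.to_bytes) raise OverflowError; for exp ≤ 0 A returns 1 for any base.
def Pre_gf_pow (base : Int) (exp : Int) : Prop := 0 < exp → 0 ≤ base
instance (base : Int) (exp : Int) : Decidable (Pre_gf_pow base exp) := by unfold Pre_gf_pow; infer_instance
def pvWitness_gf_pow : Int × Int := (3, 5)

def Spec_gf_pow (base : Int) (exp : Int) (out : Int) : Prop := out = gf_pow_alt base exp
instance (base : Int) (exp : Int) (out : Int) : Decidable (Spec_gf_pow base exp out) := by unfold Spec_gf_pow; infer_instance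

-- ===== CLAIM (what is proved, stated in full; the proofs are below) =====
def Claim_equal_gf_pow : Prop := ∀ (base : Int) (exp : Int), Dom_gf_pow base exp → Pre_gf_pow base exp → Spec_gf_pow base exp (gf_pow base exp)

-- ===== LEMMAS AND PROOFS =====

-- ---------- abstract model: LSB-first bit lists and their Nat values ----------

def bitsP (l : List Int) : Prop := ∀ x ∈ l, x = 0 ∨ x = 1

-- value of a 0/1 list, entry i weighted 2^i (the "reflected" integer)
def phi (l : List Int) : Nat := l.foldr (fun b acc => b.toNat + 2 * acc) 0

-- the GCM bit list of an integer: entry i is coefficient of x^i = bit (127 - i)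
def bitsOf (n : Nat) : List Int :=
  (List.range 128).map (fun i => if n.testBit (127 - i) then 1 else 0)

-- bit-reversal of the low m bits
def revBits : Nat → Nat → Nat
  | 0, _ => 0
  | m+1, x => x % 2 * 2 ^ m + revBits m (x / 2)

-- MSB-first value of a 0/1 list
def bigValN (l : List Int) : Nat := l.foldl (fun a z => 2 * a + z.toNat) 0

def Rlist : List Int := bytes_to_bits ((0xe1 : Int) :: List.replicate 15 0)

-- one iteration of the gcm_mul_challenge loop, as a function of the selector bit
def stepFn (ZV : List Int × List Int) (xb : Int) : List Int × List Int :=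
  (if xb ≠ 0 then List.zipWith (fun z v => PySem.Int.bxor z v) ZV.1 ZV.2 else ZV.1,
   if PySem.List.pyGetD ZV.2 (-1) 0 ≠ 0
   then List.zipWith (fun v r => PySem.Int.bxor v r)
          (0 :: PySem.List.slice ZV.2 none (some (-1))) Rlist
   else 0 :: PySem.List.slice ZV.2 none (some (-1)))

-- the old-style interleaved shift-register multiplier, as a PROOF-SIDE reference
-- implementation standing between the list loop and B's lazy-reduction multiplier
def clmulRedGo (r : Int) (a : Int) (sel : Int) : Int :=
  if h : 0 < sel then
    clmulRedGo (if PySem.Int.band sel 1 ≠ 0 then PySem.Int.bxor r a else r)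
      (let a' := a <<< (1:Nat)
       if a' >>> (128:Nat) ≠ 0 then PySem.Int.bxor a' (PySem.Int.bor ((1:Int) <<< (128:Nat)) 0x87) else a')
      (sel >>> (1:Nat))
  else r
termination_by sel.toNat
decreasing_by
  have : sel >>> (1:Nat) = sel / 2 ^ 1 := Int.shiftRight_eq_div_pow sel 1
  omega

def clmulRed (a : Int) (sel : Int) : Int := clmulRedGo 0 a sel

-- ---------- basic phi lemmas ----------

theorem phi_nil : phi [] = 0 := rfl
theorem phi_cons (b : Int) (t : List Int) : phi (b :: t) = b.toNat + 2 * phi t := rfl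

theorem phi_append (l1 l2 : List Int) : phi (l1 ++ l2) = phi l1 + 2 ^ l1.length * phi l2 := by
  induction l1 with
  | nil => simp [phi]
  | cons b t ih => simp only [List.cons_append, phi_cons, ih, List.length_cons]; ring

theorem phi_lt (l : List Int) (h : bitsP l) : phi l < 2 ^ l.length := by
  induction l with
  | nil => simp [phi]
  | cons b t ih =>
    have hb := h b (by simp)
    have ht : phi t < 2 ^ t.length := ih (fun x hx => h x (by simp [hx]))
    rw [phi_cons]
    have : b.toNat ≤ 1 := by rcases hb with h | h <;> simp [h]
    simp only [List.length_cons, pow_succ]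
    omega

theorem allzero_of_phi_zero (l : List Int) (hb : bitsP l) (h : phi l = 0) : ∀ x ∈ l, x = 0 := by
  induction l with
  | nil => simp
  | cons b t ih =>
    rw [phi_cons] at h
    intro x hx
    rcases List.mem_cons.mp hx with rfl | hx'
    · rcases hb x (by simp) with h0 | h1
      · exact h0
      · subst h1; omega
    · exact ih (fun x hx => hb x (by simp [hx])) (by omega) x hx'

-- ---------- Nat bit helpers ----------

theorem testBit_false_of_lt {x k i : Nat} (h : x < 2 ^ k) (hk : k ≤ i) : x.testBit i = false :=
  Nat.testBit_lt_two_pow (lt_of_lt_of_le h (Nat.pow_le_pow_right (by norm_num) hk))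

theorem xor_bit_step (b c x y : Nat) (hb : b < 2) (hc : c < 2) :
    (b + 2 * x) ^^^ (c + 2 * y) = (b ^^^ c) + 2 * (x ^^^ y) := by
  have hbc : b ^^^ c < 2 := by interval_cases b <;> interval_cases c <;> decide
  apply Nat.eq_of_testBit_eq
  intro i
  cases i with
  | zero =>
    rw [Nat.testBit_xor, Nat.testBit_zero, Nat.testBit_zero, Nat.testBit_zero]
    interval_cases b <;> interval_cases c <;>
      simp [Nat.add_mul_mod_self_left, Nat.mul_mod_right]
  | succ i =>
    have e1 : (b + 2 * x) / 2 = x := by omega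
    have e2 : (c + 2 * y) / 2 = y := by omega
    have e3 : ((b ^^^ c) + 2 * (x ^^^ y)) / 2 = x ^^^ y := by omega
    rw [Nat.testBit_xor, Nat.testBit_add_one, Nat.testBit_add_one, Nat.testBit_add_one, e1, e2, e3,
      Nat.testBit_xor]

theorem or_two_pow_eq_add (k u : Nat) (hu : u < 2 ^ k) : 2 ^ k ||| u = 2 ^ k + u := by
  apply Nat.eq_of_testBit_eq
  intro i
  rw [Nat.testBit_or]
  rcases lt_trichotomy i k with h | rfl | h
  · rw [Nat.testBit_two_pow_add_gt h, Nat.testBit_two_pow_of_ne (by omega)]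
    simp
  · rw [Nat.testBit_two_pow_self]
    have : (2 ^ i + u).testBit i = true := by
      rw [Nat.testBit_eq_decide_div_mod_eq]
      have : (2 ^ i + u) / 2 ^ i = 1 := by
        rw [Nat.add_div_left _ (Nat.pos_of_ne_zero (by positivity))]
        simp [Nat.div_eq_of_lt hu]
      simp [this]
    simp [this]
  · have h1 : (2 ^ k).testBit i = false := Nat.testBit_two_pow_of_ne (by omega)
    have h2 : u.testBit i = false := testBit_false_of_lt hu (by omega)
    have h3 : (2 ^ k + u).testBit i = false := by
      apply testBit_false_of_lt (k := k + 1) _ (by omega)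
      have : (2:Nat) ^ (k+1) = 2 * 2 ^ k := by rw [pow_succ]; ring
      omega
    simp [h1, h2, h3]

theorem xor_high (k u v : Nat) (hu : u < 2 ^ k) (hv : v < 2 ^ k) :
    (2 ^ k + u) ^^^ (2 ^ k + v) = u ^^^ v := by
  apply Nat.eq_of_testBit_eq
  intro i
  rw [Nat.testBit_xor, Nat.testBit_xor]
  rcases lt_trichotomy i k with h | rfl | h
  · rw [Nat.testBit_two_pow_add_gt h, Nat.testBit_two_pow_add_gt h]
  · have t1 : (2 ^ i + u).testBit i = true := by
      rw [Nat.testBit_eq_decide_div_mod_eq]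
      have : (2 ^ i + u) / 2 ^ i = 1 := by
        rw [Nat.add_div_left _ (Nat.pos_of_ne_zero (by positivity))]
        simp [Nat.div_eq_of_lt hu]
      simp [this]
    have t2 : (2 ^ i + v).testBit i = true := by
      rw [Nat.testBit_eq_decide_div_mod_eq]
      have : (2 ^ i + v) / 2 ^ i = 1 := by
        rw [Nat.add_div_left _ (Nat.pos_of_ne_zero (by positivity))]
        simp [Nat.div_eq_of_lt hv]
      simp [this]
    have f1 : u.testBit i = false := Nat.testBit_lt_two_pow hu
    have f2 : v.testBit i = false := Nat.testBit_lt_two_pow hv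
    simp [t1, t2, f1, f2]
  · have lt2 : ∀ w, w < 2 ^ k → (2 ^ k + w).testBit i = false := by
      intro w hw
      apply testBit_false_of_lt (k := k + 1) _ (by omega)
      have : (2:Nat) ^ (k+1) = 2 * 2 ^ k := by rw [pow_succ]; ring
      omega
    have f1 : u.testBit i = false := testBit_false_of_lt hu (by omega)
    have f2 : v.testBit i = false := testBit_false_of_lt hv (by omega)
    simp [lt2 u hu, lt2 v hv, f1, f2]

-- ---------- xor of bit lists ----------

theorem bxor_bits {z v : Int} (hz : z = 0 ∨ z = 1) (hv : v = 0 ∨ v = 1) :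
    PySem.Int.bxor z v = ((z.toNat ^^^ v.toNat : Nat) : Int) := by
  rcases hz with rfl | rfl <;> rcases hv with rfl | rfl <;> decide

theorem phi_zipxor (Z V : List Int) (hZ : bitsP Z) (hV : bitsP V) (hl : Z.length = V.length) :
    phi (List.zipWith (fun z v => PySem.Int.bxor z v) Z V) = phi Z ^^^ phi V := by
  induction Z generalizing V with
  | nil =>
    cases V with
    | nil => rfl
    | cons v t => simp at hl
  | cons z tz ih =>
    cases V with
    | nil => simp at hl
    | cons v tv =>
      have hz := hZ z (by simp)
      have hv := hV v (by simp)
      rw [List.zipWith_cons_cons, phi_cons, phi_cons, phi_cons,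
        bxor_bits hz hv, Int.toNat_natCast,
        ih tv (fun x hx => hZ x (by simp [hx])) (fun x hx => hV x (by simp [hx])) (by simpa using hl)]
      have h1 : z.toNat < 2 := by rcases hz with rfl | rfl <;> decide
      have h2 : v.toNat < 2 := by rcases hv with rfl | rfl <;> decide
      rw [xor_bit_step _ _ _ _ h1 h2]

theorem bits_zipxor (Z : List Int) : ∀ V : List Int, bitsP Z → bitsP V →
    bitsP (List.zipWith (fun z v => PySem.Int.bxor z v) Z V) := by
  induction Z with
  | nil => intro V _ _ x hx; simp at hx
  | cons z t ih =>
    intro V hZ hV x hx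
    cases V with
    | nil => simp at hx
    | cons v tv =>
      rw [List.zipWith_cons_cons] at hx
      rcases List.mem_cons.mp hx with rfl | hx'
      · rcases hZ z (by simp) with rfl | rfl <;> rcases hV v (by simp) with rfl | rfl <;> decide
      · exact ih tv (fun a ha => hZ a (by simp [ha])) (fun a ha => hV a (by simp [ha])) x hx'

-- ---------- rev128 ----------

def gstep (p : Int × Int) : Int × Int :=
  (PySem.Int.bor (p.1 <<< (1:Nat)) (PySem.Int.band p.2 1), p.2 >>> (1:Nat))

theorem foldl_const_iterate {α β : Type} (l : List α) (g : β → β) (s : β) :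
    l.foldl (fun s _ => g s) s = g^[l.length] s := by
  induction l generalizing s with
  | nil => rfl
  | cons a t ih => rw [List.foldl_cons, List.length_cons, Function.iterate_succ_apply, ih]

theorem rev128_eq_iterate (x : Int) : rev128 x = (gstep^[128] (0, x)).1 := by
  unfold rev128
  rw [show (128 : Int) = ((128 : Nat) : Int) from rfl, PySem.List.pyRange_zero_natCast,
    List.foldl_map]
  rw [show (fun (x : Int × Int) (y : Nat) =>
      (PySem.Int.bor (x.1 <<< (1:Nat)) (PySem.Int.band x.2 1), x.2 >>> (1:Nat)))
      = (fun (p : Int × Int) (_ : Nat) => gstep p) from rfl,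
    foldl_const_iterate (List.range 128) gstep ((0:Int), x)]
  simp

theorem two_mul_or_bit (r b : Nat) (hb : b < 2) : 2 * r ||| b = 2 * r + b := by
  interval_cases b
  · simp
  · apply Nat.eq_of_testBit_eq
    intro i
    cases i with
    | zero =>
      rw [Nat.testBit_or, Nat.testBit_zero, Nat.testBit_zero, Nat.testBit_zero]
      simp [Nat.add_mul_mod_self_left, Nat.mul_mod_right]
    | succ i =>
      have e1 : (2 * r) / 2 = r := by omega
      have e2 : (2 * r + 1) / 2 = r := by omega
      have e3 : (1 : Nat) / 2 = 0 := by norm_num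
      rw [Nat.testBit_or, Nat.testBit_add_one, Nat.testBit_add_one, Nat.testBit_add_one,
        e1, e2, e3]
      simp

theorem gstep_cast (r x : Nat) : gstep ((r : Int), (x : Int)) = (((2 * r + x % 2 : Nat) : Int), ((x / 2 : Nat) : Int)) := by
  unfold gstep
  have h1 : ((r : Int)) <<< (1:Nat) = ((r <<< 1 : Nat) : Int) := (Int.natCast_shiftLeft r 1).symm
  have h2 : PySem.Int.band (x : Int) 1 = ((x &&& 1 : Nat) : Int) := by
    rw [show (1 : Int) = ((1 : Nat) : Int) from rfl, PySem.Int.band_natCast]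
  have h3 : ((x : Int)) >>> (1:Nat) = ((x >>> 1 : Nat) : Int) := (Int.natCast_shiftRight x 1).symm
  rw [h1, h2, h3, PySem.Int.bor_natCast]
  have e1 : r <<< 1 ||| x &&& 1 = 2 * r + x % 2 := by
    rw [Nat.shiftLeft_eq, Nat.and_one_is_mod, pow_one, Nat.mul_comm]
    exact two_mul_or_bit r (x % 2) (by omega)
  have e2 : x >>> 1 = x / 2 := by rw [Nat.shiftRight_eq_div_pow, pow_one]
  rw [e1, e2]

theorem gstep_iterate (m : Nat) : ∀ (r x : Nat),
    gstep^[m] ((r : Int), (x : Int)) = (((r * 2 ^ m + revBits m x : Nat) : Int), ((x >>> m : Nat) : Int)) := by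
  induction m with
  | zero => intro r x; simp [revBits]
  | succ m ih =>
    intro r x
    rw [Function.iterate_succ_apply, gstep_cast, ih]
    congr 2
    · show (2 * r + x % 2) * 2 ^ m + revBits m (x / 2) = r * 2 ^ (m + 1) + revBits (m + 1) x
      rw [revBits]
      ring
    · rw [Nat.shiftRight_eq_div_pow, Nat.shiftRight_eq_div_pow, Nat.div_div_eq_div_mul, pow_succ']

theorem rev128_natCast (x : Nat) : rev128 (x : Int) = ((revBits 128 x : Nat) : Int) := by
  rw [rev128_eq_iterate, show (0 : Int) = ((0 : Nat) : Int) from rfl, gstep_iterate,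
    show (0 * 2 ^ 128 + revBits 128 x) = revBits 128 x from by omega]

theorem revBits_eq_phi (m : Nat) : ∀ x : Nat,
    revBits m x = phi ((List.range m).map (fun i => if x.testBit (m - 1 - i) then 1 else 0)) := by
  induction m with
  | zero => intro x; simp [revBits, phi]
  | succ m ih =>
    intro x
    rw [List.range_succ, List.map_append, phi_append]
    have hmap : (List.range m).map (fun i => if x.testBit (m + 1 - 1 - i) then (1:Int) else 0)
        = (List.range m).map (fun i => if (x / 2).testBit (m - 1 - i) then 1 else 0) := by
      apply List.map_congr_left
      intro i hi
      have hi' : i < m := List.mem_range.mp hi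
      have : m + 1 - 1 - i = (m - 1 - i) + 1 := by omega
      rw [this, Nat.testBit_add_one]
    rw [hmap, ← ih (x / 2)]
    simp only [List.map_cons, List.map_nil, List.length_map, List.length_range]
    have hsingle : phi [if x.testBit (m + 1 - 1 - m) then (1:Int) else 0] = if x.testBit 0 then 1 else 0 := by
      have : m + 1 - 1 - m = 0 := by omega
      rw [this]
      by_cases h : x.testBit 0 <;> simp [h, phi_cons, phi_nil]
    rw [hsingle, revBits]
    have : (if x.testBit 0 then (1:Nat) else 0) = x % 2 := by
      rw [Nat.testBit_zero]
      by_cases h : x % 2 = 1 <;> simp [h] <;> omega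
    rw [this]
    ring

theorem phi_bitsOf (x : Nat) : phi (bitsOf x) = revBits 128 x := by
  rw [bitsOf, show (fun i => if x.testBit (127 - i) then (1:Int) else 0)
      = (fun i => if x.testBit (128 - 1 - i) then (1:Int) else 0) from by norm_num,
    revBits_eq_phi]

-- ---------- bigVal ----------

theorem bigValN_acc (l : List Int) : ∀ a : Nat,
    l.foldl (fun a z => 2 * a + z.toNat) a = a * 2 ^ l.length + bigValN l := by
  induction l with
  | nil => intro a; simp [bigValN]
  | cons z t ih =>
    intro a
    rw [List.foldl_cons, ih (2 * a + z.toNat)]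
    have : bigValN (z :: t) = z.toNat * 2 ^ t.length + bigValN t := by
      have h0 : 2 * 0 + z.toNat = z.toNat := by omega
      rw [bigValN, List.foldl_cons, h0, ih z.toNat]
    rw [this, List.length_cons]
    ring

theorem bigValN_cons (z : Int) (t : List Int) :
    bigValN (z :: t) = z.toNat * 2 ^ t.length + bigValN t := by
  rw [bigValN, List.foldl_cons, bigValN_acc]
  simp

theorem bigValN_lt (l : List Int) (h : bitsP l) : bigValN l < 2 ^ l.length := by
  induction l with
  | nil => simp [bigValN]
  | cons z t ih =>
    rw [bigValN_cons, List.length_cons, pow_succ]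
    have hz : z.toNat ≤ 1 := by rcases h z (by simp) with h' | h' <;> simp [h']
    have ht := ih (fun x hx => h x (by simp [hx]))
    have : z.toNat * 2 ^ t.length ≤ 2 ^ t.length := by
      rcases Nat.le_one_iff_eq_zero_or_eq_one.mp hz with h' | h' <;> simp [h']
    omega

theorem revBits_phi (Z : List Int) (hZ : bitsP Z) : revBits Z.length (phi Z) = bigValN Z := by
  induction Z with
  | nil => simp [revBits, bigValN]
  | cons z t ih =>
    have hz : z.toNat < 2 := by rcases hZ z (by simp) with h | h <;> simp [h]
    rw [List.length_cons, revBits, phi_cons, bigValN_cons]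
    have e1 : (z.toNat + 2 * phi t) % 2 = z.toNat := by omega
    have e2 : (z.toNat + 2 * phi t) / 2 = phi t := by omega
    rw [e1, e2, ih (fun x hx => hZ x (by simp [hx]))]

theorem bigValN_bitsOf_aux (m : Nat) : ∀ x : Nat,
    bigValN ((List.range m).map (fun i => if x.testBit (m - 1 - i) then 1 else 0)) = x % 2 ^ m := by
  induction m with
  | zero => intro x; simp [bigValN, Nat.mod_one]
  | succ m ih =>
    intro x
    rw [List.range_succ_eq_map, List.map_cons, bigValN_cons, List.map_map]
    have hmap : ((List.range m).map ((fun i => if x.testBit (m + 1 - 1 - i) then (1:Int) else 0) ∘ Nat.succ))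
        = (List.range m).map (fun i => if x.testBit (m - 1 - i) then 1 else 0) := by
      apply List.map_congr_left
      intro i hi
      simp only [Function.comp]
      have : m + 1 - 1 - Nat.succ i = m - 1 - i := by omega
      rw [this]
    rw [hmap, ih x]
    simp only [List.length_map, List.length_range]
    have hm : m + 1 - 1 - 0 = m := by omega
    rw [hm]
    have hd : x % 2 ^ (m + 1) = x % 2 ^ m + 2 ^ m * (x / 2 ^ m % 2) := by
      rw [pow_succ]
      exact Nat.mod_mul
    have hb : (if x.testBit m then (1:Int) else 0).toNat = x / 2 ^ m % 2 := by
      rw [Nat.testBit_eq_decide_div_mod_eq]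
      by_cases h : x / 2 ^ m % 2 = 1 <;> simp [h] <;> omega
    rw [hb, hd]
    ring

theorem bitsOf_length (n : Nat) : (bitsOf n).length = 128 := by simp [bitsOf]

theorem bitsOf_bits (n : Nat) : bitsP (bitsOf n) := by
  intro x hx
  rcases List.mem_map.mp hx with ⟨i, _, rfl⟩
  by_cases h : n.testBit (127 - i) <;> simp [h]

theorem bigValN_bitsOf (x : Nat) (hx : x < 2 ^ 128) : bigValN (bitsOf x) = x := by
  rw [bitsOf, show (fun i => if x.testBit (127 - i) then (1:Int) else 0)
      = (fun i => if x.testBit (128 - 1 - i) then (1:Int) else 0) from by norm_num,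
    bigValN_bitsOf_aux, Nat.mod_eq_of_lt hx]

-- ---------- bytes_to_bits ∘ int_to_bytes ----------

set_option maxRecDepth 4096 in
theorem byte_bits : ∀ b : Nat, b < 256 →
    zfill8 (pyBin b) = (List.range 8).map (fun j => if b.testBit (7 - j) then 1 else 0) := by
  decide

theorem flat_chunks (F : Nat → Int) (a : Nat) :
    (List.range a).flatMap (fun i => (List.range 8).map (fun j => F (8 * i + j)))
      = (List.range (8 * a)).map F := by
  induction a with
  | zero => simp
  | succ a ih =>
    rw [List.range_succ (n := a), List.flatMap_append, ih]
    have h8 : 8 * (a + 1) = 8 * a + 8 := by ring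
    rw [h8, List.range_add, List.map_append]
    simp [List.map_map, Function.comp]

theorem b2bits_i2b (n : Nat) :
    bytes_to_bits (int_to_bytes (n : Int) 16) = (List.range 128).map (fun t => if n.testBit (127 - t) then 1 else 0) := by
  rw [bytes_to_bits, PySem.List.foldl_append_eq_flatMap, List.nil_append, int_to_bytes]
  rw [List.flatMap_map]
  have hcast : ((n : Int)).toNat = n := Int.toNat_natCast n
  have step1 : ∀ i ∈ List.range 16,
      (fun b : Int => zfill8 (pyBin b.toNat)) ((((n : Int).toNat >>> (8 * (16 - 1 - i))) % 256 : Nat) : Int)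
        = (List.range 8).map (fun j => if n.testBit (127 - (8 * i + j)) then 1 else 0) := by
    intro i hi
    have hi' : i < 16 := List.mem_range.mp hi
    simp only [Int.toNat_natCast, hcast]
    rw [byte_bits _ (Nat.mod_lt _ (by norm_num))]
    apply List.map_congr_left
    intro j hj
    have hj' : j < 8 := List.mem_range.mp hj
    have h256 : (256 : Nat) = 2 ^ 8 := by norm_num
    rw [h256, Nat.testBit_mod_two_pow, Nat.testBit_shiftRight]
    have h1 : 7 - j < 8 := by omega
    have h2 : 8 * (16 - 1 - i) + (7 - j) = 127 - (8 * i + j) := by omega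
    simp [h1, h2]
  rw [List.flatMap_congr step1]
  have hfc := flat_chunks (fun t => if n.testBit (127 - t) then (1:Int) else 0) 16
  norm_num at hfc
  exact hfc

theorem b2bits_i2b' (n : Nat) : bytes_to_bits (int_to_bytes (n : Int) 16) = bitsOf n := b2bits_i2b n

-- ---------- bits_to_bytes ∘ bytes_to_int ----------

theorem foldl_base_acc (c : Int) (l : List Int) : ∀ a : Int,
    l.foldl (fun a x => c * a + x) a = a * c ^ l.length + l.foldl (fun a x => c * a + x) 0 := by
  induction l with
  | nil => intro a; simp
  | cons z t ih =>
    intro a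
    rw [List.foldl_cons, ih (c * a + z), List.foldl_cons, ih (c * 0 + z), List.length_cons]
    ring

theorem bigValI_cast (Z : List Int) (hZ : bitsP Z) : ∀ a : Nat,
    Z.foldl (fun a x => 2 * a + x) ((a : Nat) : Int) = ((Z.foldl (fun a z => 2 * a + z.toNat) a : Nat) : Int) := by
  induction Z with
  | nil => intro a; simp
  | cons z t ih =>
    intro a
    rw [List.foldl_cons, List.foldl_cons]
    have hz := hZ z (by simp)
    have : 2 * ((a : Nat) : Int) + z = (((2 * a + z.toNat : Nat)) : Int) := by
      rcases hz with rfl | rfl <;> push_cast <;> ring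
    rw [this, ih (fun x hx => hZ x (by simp [hx]))]

theorem bigValN_append (X Y : List Int) :
    bigValN (X ++ Y) = bigValN X * 2 ^ Y.length + bigValN Y := by
  rw [bigValN, List.foldl_append, bigValN_acc]
  rfl

theorem chunks_val (m : Nat) : ∀ Z : List Int, bitsP Z → Z.length = 8 * m →
    ((List.range m).map (fun k => ((Z.drop (8 * k)).take 8).foldl (fun a x => 2 * a + x) 0)).foldl
      (fun a x => 256 * a + x) 0 = ((bigValN Z : Nat) : Int) := by
  induction m with
  | zero =>
    intro Z _ hl
    have : Z = [] := List.eq_nil_of_length_eq_zero (by omega)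
    subst this
    simp [bigValN]
  | succ m ih =>
    intro Z hZ hl
    rw [List.range_succ_eq_map, List.map_cons, List.map_map, List.foldl_cons]
    have hsplit : Z = Z.take 8 ++ Z.drop 8 := (List.take_append_drop 8 Z).symm
    have hlen8 : (Z.take 8).length = 8 := by rw [List.length_take]; omega
    have hbits8 : bitsP (Z.take 8) := fun x hx => hZ x (List.mem_of_mem_take hx)
    have hbitsd : bitsP (Z.drop 8) := fun x hx => hZ x (List.mem_of_mem_drop hx)
    have hld : (Z.drop 8).length = 8 * m := by rw [List.length_drop]; omega
    have hb0 : (Z.drop (8 * 0)).take 8 = Z.take 8 := by norm_num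
    have hmap : (List.range m).map ((fun k => ((Z.drop (8 * k)).take 8).foldl (fun a x => 2 * a + x) 0) ∘ Nat.succ)
        = (List.range m).map (fun k => (((Z.drop 8).drop (8 * k)).take 8).foldl (fun a x => 2 * a + x) 0) := by
      apply List.map_congr_left
      intro k _
      simp only [Function.comp, Nat.succ_eq_add_one]
      rw [List.drop_drop, show (8 : Nat) + 8 * k = 8 * (k + 1) from by ring]
    rw [hb0, hmap]
    have hchunk0 : (Z.take 8).foldl (fun a x => 2 * a + x) 0 = ((bigValN (Z.take 8) : Nat) : Int) := by
      rw [show (0 : Int) = ((0 : Nat) : Int) from rfl, bigValI_cast _ hbits8 0, bigValN]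
    rw [hchunk0, foldl_base_acc, ih (Z.drop 8) hbitsd hld]
    simp only [List.length_map, List.length_range]
    conv_rhs => rw [hsplit]
    rw [bigValN_append, hld]
    push_cast
    have h256 : (256 : Int) ^ m = 2 ^ (8 * m) := by
      rw [show (256 : Int) = 2 ^ 8 from by norm_num, ← pow_mul]
    rw [h256]
    ring

theorem b2b_val (Z : List Int) (hZ : bitsP Z) (hl : Z.length = 128) :
    bytes_to_int (bits_to_bytes Z) = ((bigValN Z : Nat) : Int) := by
  rw [bits_to_bytes, hl, show ((128 : Nat) : Int) = (128 : Int) from rfl,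
    PySem.List.foldl_append_singleton_eq_map, List.nil_append]
  rw [PySem.List.pyRange_of_pos 0 128 (by norm_num)]
  have hn : ((128 - 0 + 8 - 1) / 8 : Int).toNat = 16 := by decide
  rw [if_pos (by norm_num : (0:Int) < 128), hn, List.map_map]
  have hmap : (List.range 16).map ((fun b => (PySem.List.slice Z (some b) (some (b + 8))).foldl (fun a d => 2 * a + d) 0) ∘ (fun k : Nat => 0 + 8 * (k : Int)))
      = (List.range 16).map (fun k => ((Z.drop (8 * k)).take 8).foldl (fun a x => 2 * a + x) 0) := by
    apply List.map_congr_left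
    intro k _
    simp only [Function.comp, zero_add]
    have h1 : (8 * (k : Int)) = ((8 * k : Nat) : Int) := by push_cast; ring
    have h2 : (8 * (k : Int)) + 8 = ((8 * k + 8 : Nat) : Int) := by push_cast; ring
    rw [h2, h1, PySem.List.slice_natCast, show 8 * k + 8 - 8 * k = 8 from by omega]
  rw [hmap, bytes_to_int, chunks_val 16 Z hZ (by omega)]

-- ---------- the loop state: Z0, R and the V-step ----------

def Z0def : List Int := (PySem.List.pyRange 0 128 1).map (fun _ => 0)

set_option maxRecDepth 100000 in
theorem Z0_facts : bitsP Z0def ∧ Z0def.length = 128 ∧ phi Z0def = 0 := by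
  refine ⟨?_, by decide, by decide⟩
  show ∀ x ∈ Z0def, x = 0 ∨ x = 1
  decide

set_option maxRecDepth 100000 in
theorem R_facts : bitsP Rlist ∧ Rlist.length = 128 ∧ phi Rlist = 135 := by
  refine ⟨?_, by decide, by decide⟩
  show ∀ x ∈ Rlist, x = 0 ∨ x = 1
  decide

def Vstep (V : List Int) : List Int :=
  if PySem.List.pyGetD V (-1) 0 ≠ 0
  then List.zipWith (fun v r => PySem.Int.bxor v r) (0 :: PySem.List.slice V none (some (-1))) Rlist
  else 0 :: PySem.List.slice V none (some (-1))

set_option maxRecDepth 100000 in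
theorem mulx_corr (V : List Int) (hV : bitsP V) (hl : V.length = 128) :
    ((if ((phi V : Nat) : Int) <<< (1:Nat) >>> (128:Nat) ≠ 0
      then PySem.Int.bxor (((phi V : Nat) : Int) <<< (1:Nat)) (PySem.Int.bor ((1:Int) <<< (128:Nat)) 0x87)
      else ((phi V : Nat) : Int) <<< (1:Nat))
      = ((phi (Vstep V) : Nat) : Int))
    ∧ bitsP (Vstep V) ∧ (Vstep V).length = 128 := by
  have hne : V ≠ [] := by intro h; rw [h] at hl; simp at hl
  have hsl : PySem.List.slice V none (some (-1)) = V.dropLast := PySem.List.slice_to_neg_one V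
  have hget : PySem.List.pyGetD V (-1) 0 = V.getLast hne := PySem.List.pyGetD_neg_one V 0 hne
  have hlast := hV _ (List.getLast_mem hne)
  have hdlb : bitsP V.dropLast := fun x hx => hV x (List.mem_of_mem_dropLast hx)
  have hdll : V.dropLast.length = 127 := by rw [List.length_dropLast, hl]
  have hdlt : phi V.dropLast < 2 ^ 127 := by
    have := phi_lt V.dropLast hdlb
    rwa [hdll] at this
  have hsplit : phi V = phi V.dropLast + 2 ^ 127 * (V.getLast hne).toNat := by
    conv_lhs => rw [← List.dropLast_append_getLast hne]
    rw [phi_append, hdll, phi_cons, phi_nil]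
    omega
  have hshift : ((phi V : Nat) : Int) <<< (1:Nat) = ((2 * phi V : Nat) : Int) := by
    rw [← Int.natCast_shiftLeft, Nat.shiftLeft_eq, pow_one, Nat.mul_comm]
  have hshiftR : ((2 * phi V : Nat) : Int) >>> (128:Nat) = ((2 * phi V / 2 ^ 128 : Nat) : Int) := by
    rw [← Int.natCast_shiftRight, Nat.shiftRight_eq_div_pow]
  rcases hlast with h0 | h1
  · -- last bit 0: no reduction
    have hlt : 2 * phi V < 2 ^ 128 := by
      rw [hsplit, h0]
      simp only [Int.toNat_zero, Nat.mul_zero, Nat.add_zero]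
      omega
    have hdiv : 2 * phi V / 2 ^ 128 = 0 := Nat.div_eq_of_lt hlt
    have hcondB : ¬ (((phi V : Nat) : Int) <<< (1:Nat) >>> (128:Nat) ≠ 0) := by
      rw [hshift, hshiftR, hdiv]; decide
    have hcondA : ¬ (PySem.List.pyGetD V (-1) 0 ≠ 0) := by rw [hget, h0]; simp
    rw [if_neg hcondB, Vstep, if_neg hcondA, hsl]
    refine ⟨?_, ?_, by simp [hdll]⟩
    · rw [hshift, phi_cons]
      congr 1
      rw [hsplit, h0]
      simp only [Int.toNat_zero]
      omega
    · intro x hx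
      rcases List.mem_cons.mp hx with rfl | hx'
      · left; rfl
      · exact hdlb x hx'
  · -- last bit 1: reduce
    have h2v : 2 * phi V = 2 ^ 128 + 2 * phi V.dropLast := by
      rw [hsplit, h1]
      simp only [Int.toNat_one, Nat.mul_one]
      omega
    have hdiv : 2 * phi V / 2 ^ 128 ≠ 0 := by
      rw [h2v]
      have : 2 ^ 128 ≤ 2 ^ 128 + 2 * phi V.dropLast := by omega
      have := Nat.div_le_div_right (c := 2 ^ 128) this
      rw [Nat.div_self (by positivity)] at this
      omega
    have hcondB : (((phi V : Nat) : Int) <<< (1:Nat) >>> (128:Nat) ≠ 0) := by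
      rw [hshift, hshiftR]
      exact_mod_cast hdiv
    have hcondA : (PySem.List.pyGetD V (-1) 0 ≠ 0) := by rw [hget, h1]; simp
    rw [if_pos hcondB, Vstep, if_pos hcondA, hsl]
    have hRb := R_facts.1
    have hRl := R_facts.2.1
    have hRp := R_facts.2.2
    have hWb : bitsP (0 :: V.dropLast) := by
      intro x hx
      rcases List.mem_cons.mp hx with rfl | hx'
      · left; rfl
      · exact hdlb x hx'
    have hWl : (0 :: V.dropLast).length = 128 := by simp [hdll]
    refine ⟨?_, bits_zipxor _ _ hWb hRb, by rw [List.length_zipWith, hWl, hRl]; decide⟩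
    rw [phi_zipxor _ _ hWb hRb (by rw [hWl, hRl]), hRp, phi_cons]
    have hW : (0:Int).toNat + 2 * phi V.dropLast = 2 * phi V.dropLast := by omega
    rw [hW, hshift]
    have hc1 : (1:Int) <<< (128:Nat) = ((2 ^ 128 : Nat) : Int) := by
      rw [show (1:Int) = ((1:Nat) : Int) from rfl, ← Int.natCast_shiftLeft, Nat.shiftLeft_eq, one_mul]
    have hc87 : (0x87 : Int) = ((135 : Nat) : Int) := by norm_num
    rw [hc1, hc87, PySem.Int.bor_natCast, or_two_pow_eq_add 128 135 (by norm_num),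
      PySem.Int.bxor_natCast]
    exact congrArg (fun t : Nat => (t : Int)) (by rw [h2v, xor_high 128 _ _ (by omega) (by norm_num)])

-- ---------- indexed fold = list fold ----------

theorem foldl_range_getD {α β : Type} (l : List α) (d : α) (f : β → α → β) :
    ∀ s : β, (List.range l.length).foldl (fun s i => f s (l.getD i d)) s = l.foldl f s := by
  induction l using List.reverseRecOn with
  | nil => intro s; simp
  | append_singleton t x ih =>
    intro s
    rw [List.length_append, List.length_singleton, List.range_succ, List.foldl_append,
      List.foldl_append]
    have h1 : (List.range t.length).foldl (fun s i => f s ((t ++ [x]).getD i d)) s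
        = (List.range t.length).foldl (fun s i => f s (t.getD i d)) s := by
      apply PySem.List.foldl_congr_mem
      intro acc i hi
      have hi' : i < t.length := List.mem_range.mp hi
      rw [List.getD, List.getD, List.getElem?_append_left hi']
    rw [h1, ih]
    simp [List.getD]

-- ---------- selector-all-zero ----------

theorem fold_zero_sel (S : List Int) (h : ∀ x ∈ S, x = 0) :
    ∀ Z V : List Int, ((S.foldl stepFn (Z, V)).1 = Z) := by
  induction S with
  | nil => intro Z V; rfl
  | cons s t ih =>
    intro Z V
    rw [List.foldl_cons]
    have hs : s = 0 := h s (by simp)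
    have : stepFn (Z, V) s = (Z, Vstep V) := by
      rw [stepFn, hs]
      simp [Vstep]
    rw [this, ih (fun x hx => h x (by simp [hx]))]

-- ---------- the core loop correspondence ----------

theorem loop_corr (S : List Int) : ∀ Z V : List Int, bitsP S → bitsP Z → bitsP V →
    Z.length = 128 → V.length = 128 →
    (clmulRedGo ((phi Z : Nat) : Int) ((phi V : Nat) : Int) ((phi S : Nat) : Int)
       = ((phi ((S.foldl stepFn (Z, V)).1) : Nat) : Int))
    ∧ bitsP ((S.foldl stepFn (Z, V)).1) ∧ ((S.foldl stepFn (Z, V)).1).length = 128 := by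
  induction S with
  | nil =>
    intro Z V _ hZ _ hZl _
    rw [clmulRedGo]
    simp [phi_nil]
    exact ⟨hZ, hZl⟩
  | cons s t ih =>
    intro Z V hS hZ hV hZl hVl
    have hs := hS s (by simp)
    have ht : bitsP t := fun x hx => hS x (by simp [hx])
    by_cases h0 : phi (s :: t) = 0
    · rw [h0, clmulRedGo]
      have hz : ∀ x ∈ (s :: t), x = 0 := allzero_of_phi_zero _ hS h0
      rw [fold_zero_sel _ hz Z V]
      simp
      exact ⟨hZ, hZl⟩
    · have hpos : (0 : Int) < ((phi (s :: t) : Nat) : Int) := by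
        exact_mod_cast Nat.pos_of_ne_zero h0
      rw [clmulRedGo, dif_pos hpos]
      have hsel1 : PySem.Int.band ((phi (s :: t) : Nat) : Int) 1 = ((s.toNat : Nat) : Int) := by
        rw [show (1:Int) = ((1:Nat) : Int) from rfl, PySem.Int.band_natCast, Nat.and_one_is_mod]
        congr 1
        rw [phi_cons]
        rcases hs with h | h <;> rw [h] <;> simp [Nat.add_mul_mod_self_left] <;> omega
      have hselS : ((phi (s :: t) : Nat) : Int) >>> (1:Nat) = ((phi t : Nat) : Int) := by
        rw [← Int.natCast_shiftRight, Nat.shiftRight_eq_div_pow, pow_one, phi_cons]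
        congr 1
        rcases hs with h | h <;> rw [h] <;> simp <;> omega
      have hmul := mulx_corr V hV hVl
      rw [List.foldl_cons]
      have hZ' : bitsP (if s ≠ 0 then List.zipWith (fun z v => PySem.Int.bxor z v) Z V else Z) := by
        by_cases h : s ≠ 0
        · rw [if_pos h]; exact bits_zipxor _ _ hZ hV
        · rw [if_neg h]; exact hZ
      have hZ'l : (if s ≠ 0 then List.zipWith (fun z v => PySem.Int.bxor z v) Z V else Z).length = 128 := by
        by_cases h : s ≠ 0
        · rw [if_pos h, List.length_zipWith, hZl, hVl]; rfl
        · rw [if_neg h]; exact hZl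
      have hstep : stepFn (Z, V) s = ((if s ≠ 0 then List.zipWith (fun z v => PySem.Int.bxor z v) Z V else Z), Vstep V) := rfl
      rw [hstep]
      have hr' : (if PySem.Int.band ((phi (s :: t) : Nat) : Int) 1 ≠ 0
            then PySem.Int.bxor ((phi Z : Nat) : Int) ((phi V : Nat) : Int)
            else ((phi Z : Nat) : Int))
          = ((phi (if s ≠ 0 then List.zipWith (fun z v => PySem.Int.bxor z v) Z V else Z) : Nat) : Int) := by
        rw [hsel1]
        rcases hs with h | h
        · rw [h]; simp
        · rw [h]
          simp only [Int.toNat_one, Nat.cast_one, ne_eq, one_ne_zero, not_false_eq_true,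
            if_true, if_pos]
          rw [phi_zipxor Z V hZ hV (by omega), PySem.Int.bxor_natCast]
      rw [hr', hmul.1, hselS]
      exact ih _ _ ht hZ' hmul.2.1 hZ'l hmul.2.2

-- ---------- gf_mul_int ↔ clmulRed ----------

theorem revBits_invol (w : Nat) (hw : w < 2 ^ 128) : revBits 128 (revBits 128 w) = w := by
  rw [← phi_bitsOf w]
  have h := revBits_phi (bitsOf w) (bitsOf_bits w)
  rw [bitsOf_length] at h
  rw [h, bigValN_bitsOf w hw]

theorem gcm_fold_eq (x y : Nat) :
    gcm_mul_challenge (int_to_bytes (x : Int) 16) (int_to_bytes (y : Int) 16)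
      = bits_to_bytes ((bitsOf x).foldl stepFn (Z0def, bitsOf y)).1 := by
  rw [gcm_mul_challenge]
  rw [b2bits_i2b' x, b2bits_i2b' y]
  rw [show (128 : Int) = ((128 : Nat) : Int) from rfl, PySem.List.pyRange_zero_natCast,
    List.foldl_map]
  have hcongr : (List.range 128).foldl
      (fun (ZV : List Int × List Int) (i : Nat) =>
        (if PySem.List.pyGetD (bitsOf x) ((i : Nat) : Int) 0 ≠ 0
         then List.zipWith (fun z v => PySem.Int.bxor z v) ZV.1 ZV.2 else ZV.1,
         if PySem.List.pyGetD ZV.2 (-1) 0 ≠ 0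
         then List.zipWith (fun v r => PySem.Int.bxor v r)
                (0 :: PySem.List.slice ZV.2 none (some (-1)))
                (bytes_to_bits ((0xe1 : Int) :: List.replicate 15 0))
         else 0 :: PySem.List.slice ZV.2 none (some (-1))))
      ((List.map (fun _ => (0:Int)) (List.map (fun k : Nat => (k : Int)) (List.range 128))), bitsOf y)
      = (List.range 128).foldl (fun ZV i => stepFn ZV ((bitsOf x).getD i 0))
          ((List.map (fun _ => (0:Int)) (List.map (fun k : Nat => (k : Int)) (List.range 128))), bitsOf y) := by
    apply PySem.List.foldl_congr_mem
    intro acc i _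
    simp only [stepFn, Rlist, PySem.List.pyGetD_natCast]
  have hinit : List.map (fun _ => (0:Int)) (List.map (fun k : Nat => (k : Int)) (List.range 128)) = Z0def := by
    rw [Z0def, show (128 : Int) = ((128 : Nat) : Int) from rfl, PySem.List.pyRange_zero_natCast]
  rw [hcongr, hinit, show (128 : Nat) = (bitsOf x).length from (bitsOf_length x).symm,
    foldl_range_getD (bitsOf x) 0 stepFn]

theorem mul_corr (x y : Nat) (hx : x < 2 ^ 128) (hy : y < 2 ^ 128) :
    ∃ z : Nat, z < 2 ^ 128 ∧ gf_mul_int (x : Int) (y : Int) = (z : Int) ∧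
      clmulRed (rev128 (y : Int)) (rev128 (x : Int)) = ((revBits 128 z : Nat) : Int) := by
  have hZ0 := Z0_facts
  have hloop := loop_corr (bitsOf x) Z0def (bitsOf y) (bitsOf_bits x) hZ0.1 (bitsOf_bits y)
    hZ0.2.1 (bitsOf_length y)
  set Zf := ((bitsOf x).foldl stepFn (Z0def, bitsOf y)).1 with hZf
  refine ⟨bigValN Zf, ?_, ?_, ?_⟩
  · have := bigValN_lt Zf hloop.2.1
    rwa [hloop.2.2] at this
  · rw [gf_mul_int, gcm_fold_eq, b2b_val Zf hloop.2.1 hloop.2.2]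
  · rw [clmulRed, rev128_natCast, rev128_natCast, ← phi_bitsOf, ← phi_bitsOf]
    have h0 : ((0:Int)) = ((phi Z0def : Nat) : Int) := by rw [hZ0.2.2]; rfl
    rw [h0, hloop.1]
    have h1 : revBits 128 (phi Zf) = bigValN Zf := by
      have := revBits_phi Zf hloop.2.1
      rwa [hloop.2.2] at this
    have h2 : phi Zf < 2 ^ 128 := by
      have := phi_lt Zf hloop.2.1
      rwa [hloop.2.2] at this
    exact congrArg (fun t : Nat => (t : Int)) (by rw [← h1, revBits_invol _ h2])

-- ===================================================================
-- NEW: Nat-level carryless-polynomial development connecting B's lazy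
-- "full product then fold" multiplier to the interleaved clmulRed.
-- ===================================================================

-- ---------- generic xor facts ----------

theorem xor_left_comm (a b c : Nat) : a ^^^ (b ^^^ c) = b ^^^ (a ^^^ c) := by
  rw [← Nat.xor_assoc, Nat.xor_comm a b, Nat.xor_assoc]

theorem div_pow_testBit (x k i : Nat) : (x / 2 ^ k).testBit i = x.testBit (k + i) := by
  rw [← Nat.shiftRight_eq_div_pow, Nat.testBit_shiftRight]

theorem two_mul_xor (x y : Nat) : 2 * (x ^^^ y) = 2 * x ^^^ 2 * y := by
  have h : ∀ z : Nat, 2 * z = z <<< 1 := fun z => by rw [Nat.shiftLeft_eq]; ring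
  rw [h, h, h]
  apply Nat.eq_of_testBit_eq
  intro i
  rw [Nat.testBit_xor, Nat.testBit_shiftLeft, Nat.testBit_shiftLeft, Nat.testBit_shiftLeft,
    Nat.testBit_xor]
  by_cases hh : 1 ≤ i <;> simp [hh]

theorem mod_decompose (c k : Nat) : c % 2 ^ k ^^^ 2 ^ k * (c / 2 ^ k) = c := by
  apply Nat.eq_of_testBit_eq
  intro i
  rw [Nat.testBit_xor, Nat.testBit_mod_two_pow, Nat.testBit_two_pow_mul]
  by_cases h : i < k
  · simp [h, show ¬ (i ≥ k) from by omega]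
  · have hk : k + (i - k) = i := by omega
    simp [h, show i ≥ k from by omega, div_pow_testBit, hk]

theorem xor_cancel_left' (c x : Nat) : c ^^^ (c ^^^ x) = x := by
  rw [← Nat.xor_assoc, Nat.xor_self, Nat.zero_xor]

theorem lt_pow_of_high_bits (x n : Nat) (h : ∀ i, n ≤ i → x.testBit i = false) : x < 2 ^ n := by
  have h0 : x / 2 ^ n = 0 := by
    rw [← Nat.shiftRight_eq_div_pow]
    apply Nat.eq_of_testBit_eq
    intro i
    rw [Nat.testBit_shiftRight, h (n + i) (by omega)]
    simp
  have hpos : 0 < 2 ^ n := by positivity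
  by_contra hc
  push_neg at hc
  have : 1 ≤ x / 2 ^ n := (Nat.one_le_div_iff hpos).mpr hc
  omega

theorem le_xor_of_lt {m x y : Nat} (hx : 2 ^ m ≤ x) (hy : y < 2 ^ m) : 2 ^ m ≤ x ^^^ y := by
  by_contra hc
  push_neg at hc
  have h2 := Nat.xor_lt_two_pow hc hy
  rw [Nat.xor_assoc, Nat.xor_self, Nat.xor_zero] at h2
  omega

-- ---------- the carryless product Hn ----------

def Hn (a : Nat) (b : Nat) : Nat :=
  if h : b = 0 then 0 else 2 * Hn a (b / 2) ^^^ b % 2 * a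
termination_by b
decreasing_by exact Nat.div_lt_self (Nat.pos_of_ne_zero h) (by norm_num)

theorem Hn_zero (a : Nat) : Hn a 0 = 0 := by rw [Hn, dif_pos rfl]

theorem Hn_ne (a : Nat) {b : Nat} (h : b ≠ 0) : Hn a b = 2 * Hn a (b / 2) ^^^ b % 2 * a := by
  rw [Hn, dif_neg h]

theorem Hn_zero_left : ∀ b, Hn 0 b = 0 := by
  intro b
  induction b using Nat.strong_induction_on with
  | _ b ih =>
    by_cases h : b = 0
    · subst h; exact Hn_zero 0
    · rw [Hn_ne 0 h, ih (b / 2) (Nat.div_lt_self (Nat.pos_of_ne_zero h) (by norm_num))]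
      simp

theorem Hn_one (a : Nat) : Hn a 1 = a := by
  rw [Hn_ne a one_ne_zero]
  simp [Hn_zero]

theorem Hn_lt {m : Nat} : ∀ (n b a : Nat), a < 2 ^ m → b < 2 ^ n → Hn a b < 2 ^ (m + n) := by
  intro n
  induction n with
  | zero =>
    intro b a ha hb
    have : b = 0 := by omega
    subst this
    rw [Hn_zero]
    positivity
  | succ n ih =>
    intro b a ha hb
    by_cases h : b = 0
    · subst h; rw [Hn_zero]; positivity
    · rw [Hn_ne a h]
      have hb2 : b / 2 < 2 ^ n := by
        rw [Nat.div_lt_iff_lt_mul (by norm_num)]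
        calc b < 2 ^ (n + 1) := hb
        _ = 2 ^ n * 2 := by rw [pow_succ]
      have h1 := ih (b / 2) a ha hb2
      have h2 : 2 * Hn a (b / 2) < 2 ^ (m + (n + 1)) := by
        have : (2:Nat) ^ (m + (n + 1)) = 2 * 2 ^ (m + n) := by rw [← pow_succ']; ring_nf
        omega
      have h3 : b % 2 * a < 2 ^ (m + (n + 1)) := by
        have hba : b % 2 * a ≤ a := by
          have : b % 2 ≤ 1 := by omega
          calc b % 2 * a ≤ 1 * a := Nat.mul_le_mul_right a this
          _ = a := by ring
        have : (2:Nat) ^ m ≤ 2 ^ (m + (n + 1)) := Nat.pow_le_pow_right (by norm_num) (by omega)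
        omega
      exact Nat.xor_lt_two_pow h2 h3

theorem Hn_linear_left : ∀ (b x y : Nat), Hn (x ^^^ y) b = Hn x b ^^^ Hn y b := by
  intro b
  induction b using Nat.strong_induction_on with
  | _ b ih =>
    intro x y
    by_cases h : b = 0
    · subst h; simp [Hn_zero]
    · rw [Hn_ne _ h, Hn_ne x h, Hn_ne y h,
        ih (b / 2) (Nat.div_lt_self (Nat.pos_of_ne_zero h) (by norm_num)) x y,
        two_mul_xor]
      have hbit : b % 2 * (x ^^^ y) = b % 2 * x ^^^ b % 2 * y := by
        rcases Nat.mod_two_eq_zero_or_one b with h2 | h2 <;> simp [h2]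
      rw [hbit]
      simp [Nat.xor_assoc, Nat.xor_comm, xor_left_comm]

theorem Hn_two_mul_left : ∀ (b a : Nat), Hn (2 * a) b = 2 * Hn a b := by
  intro b
  induction b using Nat.strong_induction_on with
  | _ b ih =>
    intro a
    by_cases h : b = 0
    · subst h; simp [Hn_zero]
    · rw [Hn_ne _ h, Hn_ne a h,
        ih (b / 2) (Nat.div_lt_self (Nat.pos_of_ne_zero h) (by norm_num)) a,
        two_mul_xor]
      congr 1
      ring

theorem xor_one_even {x : Nat} (h : x % 2 = 0) : x ^^^ 1 = x + 1 := by
  apply Nat.eq_of_testBit_eq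
  intro i
  cases i with
  | zero =>
    rw [Nat.testBit_xor, Nat.testBit_zero, Nat.testBit_zero, Nat.testBit_zero]
    simp [h, Nat.add_mod, Nat.succ_mod_two_eq_one_iff.mpr h]
  | succ i =>
    rw [Nat.testBit_xor, Nat.testBit_add_one, Nat.testBit_add_one, Nat.testBit_add_one]
    have e1 : (1:Nat) / 2 = 0 := by norm_num
    have e2 : (x + 1) / 2 = x / 2 := by omega
    rw [e1, e2]
    simp

theorem Hn_alt : ∀ (b a : Nat), Hn a b = 2 * Hn (a / 2) b ^^^ a % 2 * b := by
  intro b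
  induction b using Nat.strong_induction_on with
  | _ b ih =>
    intro a
    by_cases h : b = 0
    · subst h; simp [Hn_zero]
    · have hb2 : b / 2 < b := Nat.div_lt_self (Nat.pos_of_ne_zero h) (by norm_num)
      rw [Hn_ne a h, Hn_ne (a / 2) h, ih (b / 2) hb2 a, two_mul_xor, two_mul_xor]
      -- goal: 4H ^^^ 2*(a%2*(b/2)) ^^^ b%2*a = (4H ^^^ 2*(b%2*(a/2))) ^^^ a%2*b
      have key : 2 * (a % 2 * (b / 2)) ^^^ b % 2 * a = 2 * (b % 2 * (a / 2)) ^^^ a % 2 * b := by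
        rcases Nat.mod_two_eq_zero_or_one a with ha | ha <;>
          rcases Nat.mod_two_eq_zero_or_one b with hb | hb
        · simp [ha, hb]
        · simp only [ha, hb, Nat.zero_mul, Nat.mul_zero, Nat.one_mul, Nat.mul_one,
            Nat.xor_zero, Nat.zero_xor]
          omega
        · simp only [ha, hb, Nat.zero_mul, Nat.mul_zero, Nat.one_mul, Nat.mul_one,
            Nat.xor_zero, Nat.zero_xor]
          omega
        · simp only [ha, hb, Nat.one_mul, Nat.mul_one]
          have ea : a = 2 * (a / 2) + 1 := by omega
          have eb : b = 2 * (b / 2) + 1 := by omega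
          have ea' : (2 * (a / 2)) % 2 = 0 := by omega
          have eb' : (2 * (b / 2)) % 2 = 0 := by omega
          conv_lhs => rw [ea]
          conv_rhs => rw [eb]
          rw [show 2 * (a / 2) + 1 = 2 * (a / 2) ^^^ 1 from (xor_one_even ea').symm,
            show 2 * (b / 2) + 1 = 2 * (b / 2) ^^^ 1 from (xor_one_even eb').symm]
          simp [Nat.xor_assoc, Nat.xor_comm, xor_left_comm]
      calc 2 * (2 * Hn (a / 2) (b / 2)) ^^^ 2 * (a % 2 * (b / 2)) ^^^ b % 2 * a
          = 2 * (2 * Hn (a / 2) (b / 2)) ^^^ (2 * (a % 2 * (b / 2)) ^^^ b % 2 * a) := by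
            rw [Nat.xor_assoc]
        _ = 2 * (2 * Hn (a / 2) (b / 2)) ^^^ (2 * (b % 2 * (a / 2)) ^^^ a % 2 * b) := by rw [key]
        _ = 2 * (2 * Hn (a / 2) (b / 2)) ^^^ 2 * (b % 2 * (a / 2)) ^^^ a % 2 * b := by
            rw [Nat.xor_assoc]

theorem Hn_comm : ∀ (a b : Nat), Hn a b = Hn b a := by
  intro a
  induction a using Nat.strong_induction_on with
  | _ a ih =>
    intro b
    by_cases h : a = 0
    · subst h; rw [Hn_zero_left, Hn_zero]
    · rw [Hn_alt b a, ih (a / 2) (Nat.div_lt_self (Nat.pos_of_ne_zero h) (by norm_num)) b,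
        ← Hn_ne b h]

theorem Hn_linear_right (a s t : Nat) : Hn a (s ^^^ t) = Hn a s ^^^ Hn a t := by
  rw [Hn_comm a (s ^^^ t), Hn_linear_left, Hn_comm s a, Hn_comm t a]

theorem Hn_pow2 : ∀ (k a : Nat), Hn a (2 ^ k) = 2 ^ k * a := by
  intro k
  induction k with
  | zero => intro a; simpa using Hn_one a
  | succ k ih =>
    intro a
    have hne : (2:Nat) ^ (k + 1) ≠ 0 := by positivity
    have hdiv : 2 ^ (k + 1) / 2 = 2 ^ k := by rw [pow_succ]; omega
    have hmod : 2 ^ (k + 1) % 2 = 0 := by rw [pow_succ]; omega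
    rw [Hn_ne a hne, hdiv, hmod, ih a]
    rw [Nat.zero_mul, Nat.xor_zero, pow_succ]
    ring

-- ---------- the reduction polynomial and the fold reduction ----------

def pPn : Nat := 2 ^ 128 ^^^ 135

theorem pPn_ge : 2 ^ 128 ≤ pPn := le_xor_of_lt le_rfl (by norm_num)

theorem pPn_lt : pPn < 2 ^ 129 :=
  Nat.xor_lt_two_pow (by norm_num) (by norm_num)

def R1n (c : Nat) : Nat := c % 2 ^ 128 ^^^ Hn (c / 2 ^ 128) 135

def Rn (c : Nat) : Nat := R1n (R1n c)

theorem R1n_cong (c : Nat) : R1n c = c ^^^ Hn pPn (c / 2 ^ 128) := by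
  have h1 : Hn pPn (c / 2 ^ 128) = 2 ^ 128 * (c / 2 ^ 128) ^^^ Hn (c / 2 ^ 128) 135 := by
    rw [Hn_comm pPn, pPn, Hn_linear_right, Hn_pow2]
  have h2 : c ^^^ 2 ^ 128 * (c / 2 ^ 128) = c % 2 ^ 128 := by
    have hmd := mod_decompose c 128
    calc c ^^^ 2 ^ 128 * (c / 2 ^ 128)
        = (c % 2 ^ 128 ^^^ 2 ^ 128 * (c / 2 ^ 128)) ^^^ 2 ^ 128 * (c / 2 ^ 128) := by rw [hmd]
      _ = c % 2 ^ 128 := by rw [Nat.xor_assoc, Nat.xor_self, Nat.xor_zero]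
  rw [R1n, h1, ← Nat.xor_assoc, h2]

theorem Rn_cong (c : Nat) : ∃ q, Rn c = c ^^^ Hn pPn q := by
  refine ⟨c / 2 ^ 128 ^^^ R1n c / 2 ^ 128, ?_⟩
  calc Rn c = R1n c ^^^ Hn pPn (R1n c / 2 ^ 128) := by rw [Rn]; exact R1n_cong (R1n c)
    _ = (c ^^^ Hn pPn (c / 2 ^ 128)) ^^^ Hn pPn (R1n c / 2 ^ 128) :=
        congrArg (fun t => t ^^^ Hn pPn (R1n c / 2 ^ 128)) (R1n_cong c)
    _ = c ^^^ (Hn pPn (c / 2 ^ 128) ^^^ Hn pPn (R1n c / 2 ^ 128)) := Nat.xor_assoc _ _ _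
    _ = c ^^^ Hn pPn (c / 2 ^ 128 ^^^ R1n c / 2 ^ 128) := by rw [Hn_linear_right]

theorem R1n_lt_of_lt (k : Nat) (c : Nat) (hk : k ≤ 128) (hc : c < 2 ^ (128 + k)) :
    R1n c < 2 ^ (max 128 (k + 8)) := by
  have hdiv : c / 2 ^ 128 < 2 ^ k := by
    rw [Nat.div_lt_iff_lt_mul (by positivity)]
    calc c < 2 ^ (128 + k) := hc
      _ = 2 ^ k * 2 ^ 128 := by rw [pow_add]; ring
  have hH : Hn (c / 2 ^ 128) 135 < 2 ^ (k + 8) :=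
    Hn_lt 8 135 (c / 2 ^ 128) hdiv (by norm_num)
  have hmod : c % 2 ^ 128 < 2 ^ 128 := Nat.mod_lt c (by positivity)
  apply Nat.xor_lt_two_pow
  · exact lt_of_lt_of_le hmod (Nat.pow_le_pow_right (by norm_num) (le_max_left _ _))
  · exact lt_of_lt_of_le hH (Nat.pow_le_pow_right (by norm_num) (le_max_right _ _))

theorem Rn_lt (c : Nat) (hc : c < 2 ^ 256) : Rn c < 2 ^ 128 := by
  have h1 : R1n c < 2 ^ 136 := by
    have := R1n_lt_of_lt 128 c le_rfl (by norm_num at hc ⊢; omega)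
    simpa using this
  have h2 : R1n (R1n c) < 2 ^ 128 := by
    have := R1n_lt_of_lt 8 (R1n c) (by norm_num) (by norm_num at h1 ⊢; omega)
    simpa using this
  exact h2

theorem HpP_bound : ∀ (n q : Nat), 2 ^ n ≤ q → q < 2 ^ (n + 1) →
    2 ^ (128 + n) ≤ Hn pPn q ∧ Hn pPn q < 2 ^ (129 + n) := by
  intro n
  induction n with
  | zero =>
    intro q h1 h2
    have : q = 1 := by norm_num at h1 h2; omega
    subst this
    rw [Hn_one]
    exact ⟨pPn_ge, pPn_lt⟩
  | succ n ih =>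
    intro q h1 h2
    have hd1 : 2 ^ n ≤ q / 2 := by
      rw [Nat.le_div_iff_mul_le (by norm_num)]
      calc 2 ^ n * 2 = 2 ^ (n + 1) := by rw [pow_succ]
      _ ≤ q := h1
    have hd2 : q / 2 < 2 ^ (n + 1) := by
      rw [Nat.div_lt_iff_lt_mul (by norm_num)]
      calc q < 2 ^ (n + 2) := h2
      _ = 2 ^ (n + 1) * 2 := by rw [pow_succ]
    obtain ⟨hl, hu⟩ := ih (q / 2) hd1 hd2
    have hq0 : q ≠ 0 := by
      have : (0:Nat) < 2 ^ (n + 1) := by positivity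
      omega
    rw [Hn_ne pPn hq0]
    have hbit : q % 2 * pPn < 2 ^ 129 := by
      have : q % 2 * pPn ≤ pPn := by
        have : q % 2 ≤ 1 := by omega
        calc q % 2 * pPn ≤ 1 * pPn := Nat.mul_le_mul_right pPn this
        _ = pPn := by ring
      have := pPn_lt
      omega
    have e1 : (2:Nat) ^ (129 + n) = 2 * 2 ^ (128 + n) := by rw [← pow_succ']; ring_nf
    have e2 : (2:Nat) ^ (130 + n) = 2 * 2 ^ (129 + n) := by rw [← pow_succ']; ring_nf
    constructor
    · have hx : 2 ^ (129 + n) ≤ 2 * Hn pPn (q / 2) := by omega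
      have hy : q % 2 * pPn < 2 ^ (129 + n) := by
        have : (2:Nat) ^ 129 ≤ 2 ^ (129 + n) := Nat.pow_le_pow_right (by norm_num) (by omega)
        omega
      have := le_xor_of_lt (m := 129 + n) hx hy
      calc (2:Nat) ^ (128 + (n + 1)) = 2 ^ (129 + n) := by ring_nf
      _ ≤ _ := this
    · have hx : 2 * Hn pPn (q / 2) < 2 ^ (130 + n) := by omega
      have hy : q % 2 * pPn < 2 ^ (130 + n) := by
        have : (2:Nat) ^ 129 ≤ 2 ^ (130 + n) := Nat.pow_le_pow_right (by norm_num) (by omega)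
        omega
      have := Nat.xor_lt_two_pow hx hy
      calc 2 * Hn pPn (q / 2) ^^^ q % 2 * pPn < 2 ^ (130 + n) := this
      _ = 2 ^ (129 + (n + 1)) := by ring_nf

theorem HpP_ge {q : Nat} (hq : q ≠ 0) : 2 ^ 128 ≤ Hn pPn q := by
  have h1 := Nat.pow_log_le_self 2 hq
  have h2 := Nat.lt_pow_succ_log_self (by norm_num : 1 < 2) q
  have := (HpP_bound (Nat.log 2 q) q h1 h2).1
  calc (2:Nat) ^ 128 ≤ 2 ^ (128 + Nat.log 2 q) := Nat.pow_le_pow_right (by norm_num) (by omega)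
  _ ≤ _ := this

theorem red_unique {c v1 v2 q1 q2 : Nat} (h1 : v1 < 2 ^ 128) (h2 : v2 < 2 ^ 128)
    (e1 : v1 = c ^^^ Hn pPn q1) (e2 : v2 = c ^^^ Hn pPn q2) : v1 = v2 := by
  have hx : v1 ^^^ v2 = Hn pPn (q1 ^^^ q2) := by
    rw [e1, e2, Hn_linear_right, Nat.xor_assoc, xor_left_comm c, xor_cancel_left']
  by_cases hq : q1 ^^^ q2 = 0
  · rw [hq, Hn_zero] at hx
    exact (Nat.xor_eq_zero_iff).mp hx
  · have hge := HpP_ge hq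
    have hlt : v1 ^^^ v2 < 2 ^ 128 := Nat.xor_lt_two_pow h1 h2
    rw [hx] at hlt
    omega

-- ---------- the interleaved loop at Nat level ----------

def mulxN (a : Nat) : Nat := if 2 * a / 2 ^ 128 = 0 then 2 * a else 2 * a ^^^ pPn

theorem mulxN_lt {a : Nat} (ha : a < 2 ^ 128) : mulxN a < 2 ^ 128 := by
  rw [mulxN]
  split_ifs with h
  · exact Nat.lt_of_div_eq_zero (by positivity) h
  · have hge : 2 ^ 128 ≤ 2 * a := by
      by_contra hc
      push_neg at hc
      exact h (Nat.div_eq_of_lt hc)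
    have hlt : 2 * a < 2 ^ 129 := by
      have : (2:Nat) ^ 129 = 2 * 2 ^ 128 := by norm_num [pow_succ]
      omega
    apply lt_pow_of_high_bits
    intro i hi
    rw [Nat.testBit_xor]
    by_cases hi' : 129 ≤ i
    · rw [testBit_false_of_lt (lt_of_lt_of_le hlt (Nat.pow_le_pow_right (by norm_num) hi')) le_rfl,
        testBit_false_of_lt (lt_of_lt_of_le pPn_lt (Nat.pow_le_pow_right (by norm_num) hi')) le_rfl]
      rfl
    · have hi128 : i = 128 := by omega
      subst hi128
      have t1 : (2 * a).testBit 128 = true := by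
        rw [Nat.testBit_eq_decide_div_mod_eq]
        have hdd : 2 * a / 2 ^ 128 = 1 := by
          have h2 : 2 * a < 2 * 2 ^ 128 := by
            have : (2:Nat) ^ 129 = 2 * 2 ^ 128 := by rw [pow_succ]; ring
            omega
          have l1 := (Nat.one_le_div_iff (show 0 < (2:Nat)^128 by positivity)).mpr hge
          have l2 := (Nat.div_lt_iff_lt_mul (show 0 < (2:Nat)^128 by positivity)).mpr h2
          omega
        rw [hdd]
        rfl
      have t2 : pPn.testBit 128 = true := by
        rw [pPn, Nat.testBit_xor, Nat.testBit_two_pow_self,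
          testBit_false_of_lt (show (135:Nat) < 2 ^ 128 by norm_num) le_rfl]
        rfl
      rw [t1, t2]
      rfl

theorem mulxN_decomp (a : Nat) : ∃ e, e ≤ 1 ∧ mulxN a = 2 * a ^^^ Hn pPn e := by
  rw [mulxN]
  split_ifs with h
  · exact ⟨0, by omega, by rw [Hn_zero, Nat.xor_zero]⟩
  · exact ⟨1, le_rfl, by rw [Hn_one]⟩

def GnN (r a sel : Nat) : Nat :=
  if h : sel = 0 then r else GnN (r ^^^ sel % 2 * a) (mulxN a) (sel / 2)
termination_by sel
decreasing_by exact Nat.div_lt_self (Nat.pos_of_ne_zero h) (by norm_num)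

theorem GnN_inv : ∀ (sel a r : Nat), a < 2 ^ 128 → r < 2 ^ 128 →
    GnN r a sel < 2 ^ 128 ∧ ∃ q, GnN r a sel = r ^^^ Hn a sel ^^^ Hn pPn q := by
  intro sel
  induction sel using Nat.strong_induction_on with
  | _ sel ih =>
    intro a r ha hr
    by_cases h : sel = 0
    · subst h
      rw [GnN, dif_pos rfl]
      exact ⟨hr, 0, by simp [Hn_zero]⟩
    · have hstep : GnN r a sel = GnN (r ^^^ sel % 2 * a) (mulxN a) (sel / 2) := by
        rw [GnN, dif_neg h]
      have hr' : r ^^^ sel % 2 * a < 2 ^ 128 := by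
        apply Nat.xor_lt_two_pow hr
        have : sel % 2 * a ≤ a := by
          have : sel % 2 ≤ 1 := by omega
          calc sel % 2 * a ≤ 1 * a := Nat.mul_le_mul_right a this
          _ = a := by ring
        omega
      obtain ⟨hlt, q', hq'⟩ :=
        ih (sel / 2) (Nat.div_lt_self (Nat.pos_of_ne_zero h) (by norm_num))
          (mulxN a) (r ^^^ sel % 2 * a) (mulxN_lt ha) hr'
      refine ⟨by rw [hstep]; exact hlt, ?_⟩
      obtain ⟨e, _, he⟩ := mulxN_decomp a
      refine ⟨Hn e (sel / 2) ^^^ q', ?_⟩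
      rw [hstep, hq', he, Hn_linear_left, Hn_two_mul_left]
      have hmult : Hn (Hn pPn e) (sel / 2) = Hn pPn (Hn e (sel / 2)) := by
        interval_cases e
        · simp [Hn_zero, Hn_zero_left]
        · rw [Hn_one pPn, Hn_comm 1 (sel / 2), Hn_one]
      rw [hmult, Hn_ne a h, Hn_linear_right]
      simp [Nat.xor_assoc, Nat.xor_comm, xor_left_comm]

theorem main_nat (a sel : Nat) (ha : a < 2 ^ 128) (hs : sel < 2 ^ 128) :
    Rn (Hn a sel) = GnN 0 a sel := by
  have hc : Hn a sel < 2 ^ 256 := by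
    have := Hn_lt 128 sel a ha hs
    norm_num at this ⊢
    omega
  obtain ⟨q1, hq1⟩ := Rn_cong (Hn a sel)
  obtain ⟨hG, q2, hq2⟩ := GnN_inv sel a 0 ha (by positivity)
  rw [Nat.zero_xor] at hq2
  exact red_unique (Rn_lt _ hc) hG hq1 (by rw [hq2])

-- ---------- casting B's multiplier to the Nat model ----------

theorem clmulB_natCast : ∀ (b a : Nat), clmulB (a : Int) (b : Int) = ((Hn a b : Nat) : Int) := by
  intro b
  induction b using Nat.strong_induction_on with
  | _ b ih =>
    intro a
    by_cases h : b = 0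
    · subst h
      rw [clmulB, dif_pos (by norm_num), Hn_zero]
      rfl
    · have hpos : ¬ ((b : Int) ≤ 0) := by
        have : (0:Int) < (b:Int) := by exact_mod_cast Nat.pos_of_ne_zero h
        omega
      rw [clmulB, dif_neg hpos]
      have hsh : ((b : Nat) : Int) >>> (1:Nat) = ((b / 2 : Nat) : Int) := by
        rw [← Int.natCast_shiftRight, Nat.shiftRight_eq_div_pow, pow_one]
      rw [hsh, ih (b / 2) (Nat.div_lt_self (Nat.pos_of_ne_zero h) (by norm_num)) a]
      have hshl : ((Hn a (b / 2) : Nat) : Int) <<< (1:Nat) = ((2 * Hn a (b / 2) : Nat) : Int) := by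
        rw [← Int.natCast_shiftLeft, Nat.shiftLeft_eq, pow_one, Nat.mul_comm]
      have hband : PySem.Int.band ((b : Nat) : Int) 1 = ((b % 2 : Nat) : Int) := by
        rw [show (1 : Int) = ((1 : Nat) : Int) from rfl, PySem.Int.band_natCast, Nat.and_one_is_mod]
      rw [hshl, hband, Hn_ne a h]
      rcases Nat.mod_two_eq_zero_or_one b with h2 | h2
      · rw [h2]
        simp only [Nat.cast_zero, ne_eq, not_true_eq_false, if_false]
        rw [show (0:Int) = ((0:Nat) : Int) from rfl, PySem.Int.bxor_natCast]
        simp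
      · rw [h2]
        simp only [Nat.cast_one, ne_eq, one_ne_zero, not_false_eq_true, if_true]
        rw [PySem.Int.bxor_natCast]
        simp

theorem one_shl_128 : (1:Int) <<< (128:Nat) = ((2 ^ 128 : Nat) : Int) := by
  rw [show (1:Int) = ((1:Nat) : Int) from rfl, ← Int.natCast_shiftLeft, Nat.shiftLeft_eq, one_mul]

theorem pvM128_cast : pvM128 = ((2 ^ 128 - 1 : Nat) : Int) := by
  have h1 : pvM128 = ((2 ^ 128 : Nat) : Int) - 1 := by
    rw [pvM128, Nat.shiftLeft_eq, one_mul]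
  rw [h1, ← Nat.cast_one (R := Int), ← Nat.cast_sub Nat.one_le_two_pow]

theorem band_M128 (c : Nat) : PySem.Int.band ((c : Nat) : Int) pvM128 = ((c % 2 ^ 128 : Nat) : Int) := by
  rw [pvM128_cast, PySem.Int.band_natCast, Nat.and_two_pow_sub_one_eq_mod]

theorem shr128_cast (c : Nat) : ((c : Nat) : Int) >>> (128:Nat) = ((c / 2 ^ 128 : Nat) : Int) := by
  rw [← Int.natCast_shiftRight, Nat.shiftRight_eq_div_pow]

theorem gfMulB_natCast (a b : Nat) : gfMulB (a : Int) (b : Int) = ((Rn (Hn a b) : Nat) : Int) := by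
  rw [gfMulB]
  have hstep : ∀ c : Nat,
      PySem.Int.bxor (PySem.Int.band ((c : Nat) : Int) pvM128)
        (clmulB (((c : Nat) : Int) >>> (128:Nat)) 0x87) = ((R1n c : Nat) : Int) := by
    intro c
    rw [band_M128, shr128_cast, show (0x87 : Int) = ((135 : Nat) : Int) from by norm_num,
      clmulB_natCast, PySem.Int.bxor_natCast, R1n]
  rw [clmulB_natCast b a, hstep (Hn a b), hstep (R1n (Hn a b))]
  rfl

theorem clmulRedGo_natCast : ∀ (sel a r : Nat), a < 2 ^ 128 →
    clmulRedGo (r : Int) (a : Int) (sel : Int) = ((GnN r a sel : Nat) : Int) := by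
  intro sel
  induction sel using Nat.strong_induction_on with
  | _ sel ih =>
    intro a r ha
    by_cases h : sel = 0
    · subst h
      rw [clmulRedGo, dif_neg (by norm_num), GnN]
      simp
    · have hpos : (0:Int) < (sel : Int) := by exact_mod_cast Nat.pos_of_ne_zero h
      rw [clmulRedGo, dif_pos hpos]
      have hband : PySem.Int.band ((sel : Nat) : Int) 1 = ((sel % 2 : Nat) : Int) := by
        rw [show (1 : Int) = ((1 : Nat) : Int) from rfl, PySem.Int.band_natCast, Nat.and_one_is_mod]
      have hshl : ((a : Nat) : Int) <<< (1:Nat) = ((2 * a : Nat) : Int) := by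
        rw [← Int.natCast_shiftLeft, Nat.shiftLeft_eq, pow_one, Nat.mul_comm]
      have hshr : ((2 * a : Nat) : Int) >>> (128:Nat) = ((2 * a / 2 ^ 128 : Nat) : Int) := by
        rw [← Int.natCast_shiftRight, Nat.shiftRight_eq_div_pow]
      have hP : PySem.Int.bor ((1:Int) <<< (128:Nat)) 0x87 = ((pPn : Nat) : Int) := by
        rw [one_shl_128, show (0x87 : Int) = ((135 : Nat) : Int) from by norm_num,
          PySem.Int.bor_natCast]
        congr 1
      have hrstep : (if PySem.Int.band ((sel : Nat) : Int) 1 ≠ 0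
            then PySem.Int.bxor ((r : Nat) : Int) ((a : Nat) : Int) else ((r : Nat) : Int))
          = ((r ^^^ sel % 2 * a : Nat) : Int) := by
        rw [hband]
        rcases Nat.mod_two_eq_zero_or_one sel with h2 | h2
        · rw [h2]; simp
        · rw [h2]
          simp only [Nat.cast_one, ne_eq, one_ne_zero, not_false_eq_true, if_true]
          rw [PySem.Int.bxor_natCast]
          simp
      have hastep : (let a' := ((a : Nat) : Int) <<< (1:Nat)
            if a' >>> (128:Nat) ≠ 0 then PySem.Int.bxor a' (PySem.Int.bor ((1:Int) <<< (128:Nat)) 0x87) else a')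
          = ((mulxN a : Nat) : Int) := by
        simp only [hshl]
        rw [hshr, hP, mulxN]
        by_cases hz : 2 * a / 2 ^ 128 = 0
        · rw [hz]
          simp
        · rw [if_neg hz]
          have : ((2 * a / 2 ^ 128 : Nat) : Int) ≠ 0 := by exact_mod_cast hz
          rw [if_pos this, PySem.Int.bxor_natCast]
      have hshrsel : ((sel : Nat) : Int) >>> (1:Nat) = ((sel / 2 : Nat) : Int) := by
        rw [← Int.natCast_shiftRight, Nat.shiftRight_eq_div_pow, pow_one]
      have hstep : GnN r a sel = GnN (r ^^^ sel % 2 * a) (mulxN a) (sel / 2) := by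
        rw [GnN, dif_neg h]
      rw [hrstep, hastep, hshrsel,
        ih (sel / 2) (Nat.div_lt_self (Nat.pos_of_ne_zero h) (by norm_num)) (mulxN a) _ (mulxN_lt ha),
        hstep]

theorem revBits_lt (x : Nat) : revBits 128 x < 2 ^ 128 := by
  rw [revBits_eq_phi]
  have hb : bitsP ((List.range 128).map (fun i => if x.testBit (128 - 1 - i) then (1:Int) else 0)) := by
    intro y hy
    rcases List.mem_map.mp hy with ⟨i, _, rfl⟩
    by_cases h : x.testBit (128 - 1 - i) <;> simp [h]
  have := phi_lt _ hb
  simpa using this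

theorem gfMulB_eq_clmulRed (a s : Nat) (ha : a < 2 ^ 128) (hs : s < 2 ^ 128) :
    gfMulB (a : Int) (s : Int) = clmulRed (a : Int) (s : Int) := by
  rw [gfMulB_natCast, main_nat a s ha hs, clmulRed,
    show (0:Int) = ((0:Nat) : Int) from rfl, clmulRedGo_natCast s a 0 ha]

theorem gfMulB_rev (x y : Nat) :
    gfMulB (rev128 (x : Int)) (rev128 (y : Int)) = clmulRed (rev128 (x : Int)) (rev128 (y : Int)) := by
  rw [rev128_natCast, rev128_natCast]
  exact gfMulB_eq_clmulRed _ _ (revBits_lt x) (revBits_lt y)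

-- ---------- the square-and-multiply loops ----------

theorem rev128_invol_int (w : Nat) (hw : w < 2 ^ 128) : rev128 (rev128 (w : Int)) = (w : Int) := by
  rw [rev128_natCast, rev128_natCast, revBits_invol w hw]

theorem loopAB (n : Nat) : ∀ (e : Int) (r b : Nat), e.toNat ≤ n → r < 2 ^ 128 → b < 2 ^ 128 →
    gfPowLoopA (r : Int) (b : Int) e = rev128 (gfPowLoopB (rev128 (r : Int)) (rev128 (b : Int)) e) := by
  induction n with
  | zero =>
    intro e r b hn hr hb
    have he : ¬ 0 < e := by omega
    rw [gfPowLoopA, gfPowLoopB, dif_neg he, dif_neg he, rev128_invol_int r hr]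
  | succ n ih =>
    intro e r b hn hr hb
    by_cases he : 0 < e
    · rw [gfPowLoopA, gfPowLoopB, dif_pos he, dif_pos he, gfMulB_rev b r, gfMulB_rev b b]
      have he' : (e >>> (1:Nat)).toNat ≤ n := by
        have : e >>> (1:Nat) = e / 2 ^ 1 := Int.shiftRight_eq_div_pow e 1
        omega
      obtain ⟨w, hw, hweq, hwrev⟩ := mul_corr b b hb hb
      have hrevw : rev128 ((w : Nat) : Int) = ((revBits 128 w : Nat) : Int) := rev128_natCast w
      by_cases hc : PySem.Int.band e 1 ≠ 0
      · rw [if_pos hc, if_pos hc]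
        obtain ⟨z, hz, hzeq, hzrev⟩ := mul_corr r b hr hb
        rw [hzeq, hweq, ih (e >>> (1:Nat)) z w he' hz hw, hzrev, hwrev,
          ← rev128_natCast z, ← rev128_natCast w]
      · rw [if_neg hc, if_neg hc]
        rw [hweq, ih (e >>> (1:Nat)) r w he' hr hw, hwrev, ← rev128_natCast w]
    · rw [gfPowLoopA, gfPowLoopB, dif_neg he, dif_neg he, rev128_invol_int r hr]

-- ===== VERDICT (by name: the statement is the Claim_ definition above) =====
theorem gf_pow_spec : Claim_equal_gf_pow := by
  intro base exp hdom hpre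
  unfold Spec_gf_pow gf_pow gf_pow_alt
  by_cases he : exp ≤ 0
  · rw [if_pos he, gfPowLoopA, dif_neg (by omega : ¬ 0 < exp)]
  · rw [if_neg he]
    have h0 : 0 < exp := by omega
    have hb0 : 0 ≤ base := hpre h0
    have hb31 : base ≤ 2147483648 := by
      unfold Dom_gf_pow pvDomInt at hdom
      simp only [Bool.and_eq_true, decide_eq_true_eq] at hdom
      exact hdom.1.2
    have hbase : base = ((base.toNat : Nat) : Int) := (Int.toNat_of_nonneg hb0).symm
    have hbn : base.toNat < 2 ^ 128 := by
      have h128 : (2:Nat) ^ 128 = 340282366920938463463374607431768211456 := by norm_num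
      omega
    rw [hbase, show (1:Int) = ((1:Nat) : Int) from rfl]
    exact loopAB exp.toNat exp 1 base.toNat le_rfl (by norm_num) hbn
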